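-- pv_equiv track=rewrite | github.com/tim25651/dpkg-scanpackages-py | src/dpkg_scanpackages/utils.py | format_headers
-- ===== SOURCE A (Python) =====
-- HEADER_ORDER = [
--     "Package",
--     "Version",
--     "Architecture",
--     "Built-Using",
--     "Multi-Arch",
--     "Essential",
--     "Source",
--     "Origin",
--     "Maintainer",
--     "Original-Maintainer",
--     "Bugs",
--     "Installed-Size",
--     "Provides",
--     "Pre-Depends",
--     "Depends",
--     "Recommends",
--     "Suggests",
--     "Conflicts",
--     "Breaks",
--     "Replaces",
--     "Enhances",
--     "Filename",
--     "Size",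
--     "MD5sum",
--     "SHA1",
--     "SHA256",
--     "SHA512",
--     "Section",
--     "Priority",
--     "Homepage",
--     "Description",
--     "Tag",
--     "Task",
--     "Protected",
--     "Important",
--     "Description-md5",
--     "Build-Essential",
--     "Support",
-- ]
--
-- def format_headers(headers: dict[str, str]) -> str:
--     """Format the headers."""
--     pretty = ""
--     # add as per key order
--     for key in HEADER_ORDER:
--         if key in headers:
--             pretty = pretty + (f"{key}: {headers[key]}\n")
--
--     # add the rest alphabetically
--     for key in sorted(headers):
--         if key not in HEADER_ORDER:
--             pretty = pretty + (f"{key}: {headers[key]}\n")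
--     return pretty
-- ===== SOURCE B (Python) =====
-- HEADER_ORDER = [
--     "Package", "Version", "Architecture", "Built-Using", "Multi-Arch",
--     "Essential", "Source", "Origin", "Maintainer", "Original-Maintainer",
--     "Bugs", "Installed-Size", "Provides", "Pre-Depends", "Depends",
--     "Recommends", "Suggests", "Conflicts", "Breaks", "Replaces",
--     "Enhances", "Filename", "Size", "MD5sum", "SHA1", "SHA256", "SHA512",
--     "Section", "Priority", "Homepage", "Description", "Tag", "Task",
--     "Protected", "Important", "Description-md5", "Build-Essential",
--     "Support",
-- ]
--
--
-- def format_headers(headers: "dict[str, str]") -> str: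
--     """Format the headers."""
--     index = {key: i for i, key in enumerate(HEADER_ORDER)}
--     sentinel = len(HEADER_ORDER)
--     keys = sorted(headers, key=lambda k: (index.get(k, sentinel), k))
--     return "".join(f"{key}: {headers[key]}\n" for key in keys)
-- ===== Notes on version B (the rewrite author's own statement) =====
-- stated objective: simpler
-- what changed: A's two filtering passes (one over HEADER_ORDER, then one over the sorted keys skipping HEADER_ORDER members) are replaced by a single sort of the dict's keys under the composite key (priority-index with sentinel len(HEADER_ORDER), key) followed by one join.
import Mathlib
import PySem

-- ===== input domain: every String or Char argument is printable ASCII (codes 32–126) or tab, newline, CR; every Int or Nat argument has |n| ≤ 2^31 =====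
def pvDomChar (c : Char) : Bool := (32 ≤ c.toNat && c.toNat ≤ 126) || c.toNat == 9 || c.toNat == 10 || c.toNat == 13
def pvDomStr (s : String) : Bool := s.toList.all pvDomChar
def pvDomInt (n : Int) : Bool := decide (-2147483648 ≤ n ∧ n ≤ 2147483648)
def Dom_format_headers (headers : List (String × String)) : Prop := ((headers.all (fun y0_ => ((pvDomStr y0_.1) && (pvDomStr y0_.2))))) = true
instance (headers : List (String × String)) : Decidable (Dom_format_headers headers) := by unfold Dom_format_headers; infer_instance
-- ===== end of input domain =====

-- B (simpler): instead of A's two filtering passes, B sorts the keys once under the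
-- composite key (priority index with sentinel len(HEADER_ORDER), key) and joins the lines.

-- ===== PORT A =====
def headerOrder : List String := ["Package", "Version", "Architecture", "Built-Using", "Multi-Arch", "Essential", "Source", "Origin", "Maintainer", "Original-Maintainer", "Bugs", "Installed-Size", "Provides", "Pre-Depends", "Depends", "Recommends", "Suggests", "Conflicts", "Breaks", "Replaces", "Enhances", "Filename", "Size", "MD5sum", "SHA1", "SHA256", "SHA512", "Section", "Priority", "Homepage", "Description", "Tag", "Task", "Protected", "Important", "Description-md5", "Build-Essential", "Support"]

def format_headers (headers : List (String × String)) : String :=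
  let d := PySem.Dict.ofList headers
  let pretty : String := ""
  -- for key in HEADER_ORDER: if key in headers: pretty += f"{key}: {headers[key]}\n"
  let pretty := headerOrder.foldl
    (fun pretty key =>
      if d.contains key then pretty ++ (key ++ ": " ++ d.getD key "" ++ "\n") else pretty)
    pretty
  -- for key in sorted(headers): if key not in HEADER_ORDER: pretty += f"{key}: {headers[key]}\n"
  let pretty := (PySem.List.sorted d.keys (fun k => k)).foldl
    (fun pretty key =>
      if headerOrder.contains key then pretty
      else pretty ++ (key ++ ": " ++ d.getD key "" ++ "\n"))
    pretty
  pretty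

-- ===== PORT B =====
-- index = {key: i for i, key in enumerate(HEADER_ORDER)}  (hoisted: it does not depend on the input)
def hdrIndex : PySem.Dict String Int :=
  (PySem.List.enumerate headerOrder 0).foldl (fun d p => d.insert p.2 p.1) PySem.Dict.empty

def format_headers_alt (headers : List (String × String)) : String :=
  let d := PySem.Dict.ofList headers
  let sentinel : Int := (headerOrder.length : Int)
  let keys := PySem.List.sorted2 d.keys (fun k => hdrIndex.getD k sentinel) (fun k => k)
  PySem.Str.join "" (keys.map (fun key => key ++ ": " ++ d.getD key "" ++ "\n"))

-- ===== PRECONDITION & SPEC =====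
def Spec_format_headers (headers : List (String × String)) (out : String) : Prop := out = format_headers_alt headers
instance (headers : List (String × String)) (out : String) : Decidable (Spec_format_headers headers out) := by unfold Spec_format_headers; infer_instance

-- ===== CLAIM (what is proved, stated in full; the proofs are below) =====
def Claim_equal_format_headers : Prop := ∀ (headers : List (String × String)), Dom_format_headers headers → Spec_format_headers headers (format_headers headers)

-- ===== LEMMAS AND PROOFS =====

theorem hoNodup : headerOrder.Nodup := by decide

theorem enum_snd (l : List String) (s : Int) : (PySem.List.enumerate l s).map Prod.snd = l := by
  induction l generalizing s with
  | nil => simp [PySem.List.enumerate_nil]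
  | cons x xs ih => simp [PySem.List.enumerate_cons, ih]

theorem hdr_items :
    hdrIndex.items = (PySem.List.enumerate headerOrder 0).map (fun p => (p.2, p.1)) := by
  have hnd : ((PySem.List.enumerate headerOrder 0).map (fun p => p.2)).Nodup := by
    rw [show (fun p : Int × String => p.2) = Prod.snd from rfl, enum_snd]; exact hoNodup
  have h := PySem.Dict.items_foldl_insert_fresh (PySem.List.enumerate headerOrder 0)
    (fun p => p.2) (fun p => p.1) PySem.Dict.empty
    (fun a _ => PySem.Dict.contains_empty _) hnd
  simpa [hdrIndex, PySem.Dict.empty, PySem.Dict.items] using h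

theorem hdr_keys : hdrIndex.keys = headerOrder := by
  have : hdrIndex.keys = hdrIndex.items.map Prod.fst := by
    simp [PySem.Dict.keys]
  rw [this, hdr_items, List.map_map]
  rw [show (Prod.fst ∘ fun p : Int × String => (p.2, p.1)) = Prod.snd from rfl, enum_snd]

theorem k1_get (i : Nat) (hi : i < headerOrder.length) :
    hdrIndex.getD headerOrder[i] ((headerOrder.length : Int)) = (i : Int) := by
  apply PySem.Dict.getD_of_mem_items
  · rw [hdr_items]
    refine List.mem_map.mpr ⟨((i : Int), headerOrder[i]), ?_, rfl⟩
    rw [PySem.List.enumerate_eq_zipIdx_map]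
    refine List.mem_map.mpr ⟨(headerOrder[i], i), ?_, by simp⟩
    have hz : i < headerOrder.zipIdx.length := by simpa using hi
    have h1 : headerOrder.zipIdx[i] = (headerOrder[i], i) := by
      rw [List.getElem_zipIdx]
      exact congrArg (Prod.mk headerOrder[i]) (Nat.zero_add i)
    exact h1 ▸ List.getElem_mem hz
  · rw [hdr_keys]; exact hoNodup

theorem k1_lt {k : String} (hk : k ∈ headerOrder) :
    hdrIndex.getD k ((headerOrder.length : Int)) < (headerOrder.length : Int) := by
  obtain ⟨i, hi, rfl⟩ := List.getElem_of_mem hk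
  rw [k1_get i hi]; exact_mod_cast hi

theorem k1_default {k : String} (hk : k ∉ headerOrder) :
    hdrIndex.getD k ((headerOrder.length : Int)) = (headerOrder.length : Int) := by
  apply PySem.Dict.getD_of_not_contains
  cases h : hdrIndex.contains k with
  | false => rfl
  | true =>
    exact absurd (by rw [← hdr_keys]; exact (PySem.Dict.contains_iff_mem_keys _ _).mp h) hk

theorem hoPairwise :
    headerOrder.Pairwise (fun a b =>
      hdrIndex.getD a ((headerOrder.length : Int)) < hdrIndex.getD b ((headerOrder.length : Int))) := by
  rw [List.pairwise_iff_getElem]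
  intro i j hi hj hij
  rw [k1_get i hi, k1_get j hj]; exact_mod_cast hij

theorem sorted2_eq_sorted_lex (xs : List String) (f : String → Int) :
    PySem.List.sorted2 xs f (fun k => k)
      = PySem.List.sorted xs (fun k => (toLex (f k, k) : Lex (Int × String))) := by
  rw [PySem.List.sorted_eq_foldl_insertBy]
  have hb : (fun a b => decide (f a < f b) || (!decide (f b < f a) && decide (a < b)))
      = (fun a b : String => decide ((toLex (f a, a) : Lex (Int × String)) < toLex (f b, b))) := by
    funext a b
    rcases lt_trichotomy (f a) (f b) with h | h | h
    · simp [Prod.Lex.lt_iff, h, asymm h]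
    · simp [Prod.Lex.lt_iff, h]
    · simp [Prod.Lex.lt_iff, h, asymm h, (ne_of_gt h : f a ≠ f b)]
  simp only [PySem.List.sorted2, Bool.false_eq_true, if_false, hb]

theorem sorted_strict (xs : List String) (h : xs.Nodup) :
    (PySem.List.sorted xs (fun k => k)).Pairwise (· < ·) := by
  have hle := PySem.List.sorted_pairwise xs (fun k => k)
  have hnd : (PySem.List.sorted xs (fun k => k)).Nodup :=
    ((PySem.List.sorted_perm xs (fun k => k) false).nodup_iff).mpr h
  exact (hle.and hnd).imp (fun hab => lt_of_le_of_ne hab.1 hab.2)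

theorem filter_sorted (xs : List String) (h : xs.Nodup) (q : String → Bool) :
    PySem.List.sorted (xs.filter q) (fun k => k) = (PySem.List.sorted xs (fun k => k)).filter q := by
  apply PySem.List.sorted_eq_of_perm_of_pairwise_lt
  · exact (PySem.List.sorted_perm xs (fun k => k) false).filter q
  · exact (sorted_strict xs h).filter q

theorem key_order (d : PySem.Dict String String) (hnd : d.keys.Nodup) :
    PySem.List.sorted d.keys
        (fun k => (toLex (hdrIndex.getD k ((headerOrder.length : Int)), k) : Lex (Int × String)))
      = headerOrder.filter (fun k => d.contains k)
        ++ PySem.List.sorted (d.keys.filter (fun k => !headerOrder.contains k)) (fun k => k) := by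
  apply PySem.List.sorted_eq_of_perm_of_pairwise_lt
  · refine List.Perm.trans
      (List.Perm.append ?_ (PySem.List.sorted_perm _ _ false))
      (List.filter_append_perm (fun k => headerOrder.contains k) d.keys)
    refine (List.perm_ext_iff_of_nodup (hoNodup.filter _) (hnd.filter _)).mpr ?_
    intro a
    simp only [List.mem_filter, List.contains_iff_mem, PySem.Dict.contains_iff_mem_keys]
    exact ⟨fun ⟨h1, h2⟩ => ⟨h2, by simpa using h1⟩, fun ⟨h1, h2⟩ => ⟨by simpa using h2, h1⟩⟩
  · have hmem : ∀ x ∈ PySem.List.sorted (d.keys.filter (fun k => !headerOrder.contains k)) (fun k => k),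
        hdrIndex.getD x ((headerOrder.length : Int)) = (headerOrder.length : Int) := by
      intro x hx
      have hx' := ((PySem.List.sorted_perm (d.keys.filter (fun k => !headerOrder.contains k)) (fun k => k) false).mem_iff).mp hx
      have hq := (List.mem_filter.mp hx').2
      refine k1_default (fun hm => ?_)
      simp [hm] at hq
    rw [List.pairwise_append]
    refine ⟨?_, ?_, ?_⟩
    · refine List.Pairwise.filter _ (hoPairwise.imp ?_)
      intro a b hab
      rw [Prod.Lex.lt_iff]; left; simpa using hab
    · refine List.Pairwise.imp_of_mem ?_ (sorted_strict _ (hnd.filter _))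
      intro a b ha hb hab
      rw [Prod.Lex.lt_iff]; right
      exact ⟨by simp [hmem a ha, hmem b hb], by simpa using hab⟩
    · intro a ha b hb
      have ha' : a ∈ headerOrder := (List.mem_filter.mp ha).1
      have hb' := hmem b hb
      rw [Prod.Lex.lt_iff]; left
      simpa [hb'] using k1_lt ha'

theorem join_cons (s : String) (rest : List String) :
    PySem.Str.join "" (s :: rest) = s ++ PySem.Str.join "" rest := by
  cases rest with
  | nil => simp [PySem.Str.join, PySem.Chars.join, List.intercalate]
  | cons t ts =>
    simp only [PySem.Str.join, List.map_cons]
    rw [show ("" : String).toList = [] from rfl, PySem.Chars.join_cons_cons]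
    simp [String.ofList_append]

theorem foldl_append_join (f : String → String) (l : List String) (acc : String) :
    l.foldl (fun s k => s ++ f k) acc = acc ++ PySem.Str.join "" (l.map f) := by
  induction l generalizing acc with
  | nil => simp [PySem.Str.join, PySem.Chars.join, List.intercalate]
  | cons x xs ih => simp [List.foldl_cons, ih, join_cons, String.append_assoc]

theorem both_eq (d : PySem.Dict String String) (hnd : d.keys.Nodup) :
    (PySem.List.sorted d.keys (fun k => k)).foldl
        (fun pretty key =>
          if headerOrder.contains key then pretty
          else pretty ++ (key ++ ": " ++ d.getD key "" ++ "\n"))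
        (headerOrder.foldl
          (fun pretty key =>
            if d.contains key then pretty ++ (key ++ ": " ++ d.getD key "" ++ "\n") else pretty)
          "")
      = PySem.Str.join ""
          ((PySem.List.sorted2 d.keys
              (fun k => hdrIndex.getD k ((headerOrder.length : Int))) (fun k => k)).map
            (fun key => key ++ ": " ++ d.getD key "" ++ "\n")) := by
  have hg2 : (fun (pretty : String) key =>
        if headerOrder.contains key then pretty
        else pretty ++ (key ++ ": " ++ d.getD key "" ++ "\n"))
      = (fun (pretty : String) key =>
        if !headerOrder.contains key then pretty ++ (key ++ ": " ++ d.getD key "" ++ "\n")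
        else pretty) := by
    funext p k; cases headerOrder.contains k <;> rfl
  rw [hg2, PySem.List.foldl_if_eq_foldl_filter, PySem.List.foldl_if_eq_foldl_filter,
    ← List.foldl_append, ← filter_sorted _ hnd, ← key_order d hnd, ← sorted2_eq_sorted_lex,
    foldl_append_join]
  simp

theorem main_eq (headers : List (String × String)) :
    format_headers headers = format_headers_alt headers := by
  unfold format_headers format_headers_alt
  exact both_eq (PySem.Dict.ofList headers) (PySem.Dict.nodup_keys_ofList headers)

-- ===== VERDICT (by name: the statement is the Claim_ definition above) =====
theorem format_headers_spec : Claim_equal_format_headers := by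
  intro headers _
  unfold Spec_format_headers
  exact main_eq headers
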